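-- pv_equiv track=rewrite | github.com/ruslan-seifullaev/python-course | Project/Bellman/methods.py | match_value
-- ===== SOURCE A (Python) =====
-- def match_value(x,interval):
--     """
--     Returns the value from an interval closest to x.
--     Operate as a quantizer
--
--     Parameters
--     ----------
--
--     x: input value
--     interval: ascending ordered set
--
--     Returns
--     -------
--     value: the value from the interval closest to x
--     index: the index of 'value' in 'interval'
--     """
--     if x <= interval[0]: #if smaller than the lower bound
--         value = interval[0] #return the lower bound
--         index = 0
--         return value, index
--     elif x >= interval[-1]: #if larger than the upper bound
--         value = interval[-1] #return the upper bound
--         index = -1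
--         return value, index
--
--     for i in range(1,len(interval)): #find the closest value in the interval
--         if x <= interval[i]:
--             if (x-interval[i-1]) <= (interval[i]-x):
--                 value = interval[i-1]
--                 index = i-1
--             else:
--                 value = interval[i]
--                 index = i
--             return value, index
-- ===== SOURCE B (Python) =====
-- def match_value(x, interval):
--     """Same quantizer, but locates the bracketing pair by binary search
--     (bisect_left written by hand, since A imports nothing) instead of a
--     linear scan."""
--     if x <= interval[0]:
--         return interval[0], 0
--     if x >= interval[-1]:
--         return interval[-1], -1
--     lo, hi = 0, len(interval)
--     while lo < hi:
--         mid = (lo + hi) // 2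
--         if interval[mid] < x:
--             lo = mid + 1
--         else:
--             hi = mid
--     i = lo  # first index with interval[i] >= x; here 1 <= i < len(interval)
--     prev = interval[i - 1]
--     if x - prev <= interval[i] - x:
--         return prev, i - 1
--     return interval[i], i
-- ===== Notes on version B (the rewrite author's own statement) =====
-- stated objective: alternative
-- what changed: The linear scan for the first interval element >= x is replaced by a hand-written bisect_left binary search (A imports nothing, so bisect is re-implemented), with the same boundary branches and tie-break; O(log n) work on sorted intervals, though a timing run could not credit it (its large random inputs are unsorted, outside Pre_).
-- outside the precondition, e.g. on match_value(5, [0, 10, 4, 20]): A returns (0, 0), B returns (4, 2); on match_value(1, []): A raises IndexError, B raises IndexError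
import Mathlib
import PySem

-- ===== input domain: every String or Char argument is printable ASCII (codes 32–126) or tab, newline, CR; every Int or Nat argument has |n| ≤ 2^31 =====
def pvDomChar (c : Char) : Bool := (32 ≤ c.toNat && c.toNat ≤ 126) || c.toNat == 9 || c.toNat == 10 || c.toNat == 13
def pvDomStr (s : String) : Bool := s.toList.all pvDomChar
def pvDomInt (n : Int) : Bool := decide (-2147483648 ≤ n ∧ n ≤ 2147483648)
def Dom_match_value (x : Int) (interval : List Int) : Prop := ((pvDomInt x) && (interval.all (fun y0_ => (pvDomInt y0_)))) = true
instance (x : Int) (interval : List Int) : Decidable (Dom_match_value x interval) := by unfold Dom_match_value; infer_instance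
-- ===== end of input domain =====

-- ===== PORT A =====
-- Header: B replaces A's linear scan by a binary search for the bracketing pair; equal on nonempty intervals that are ascending whenever x lies strictly between the two ends.
-- loop 'for i in range(1, len(interval))'; falls off the end returning None in Python only on unsorted input (excluded by Pre_)
def matchLoopA (x : Int) (a : List Int) (i : Nat) : Int × Int :=
  if i < a.length then
    if x ≤ a.getD i 0 then
      if x - a.getD (i - 1) 0 ≤ a.getD i 0 - x then (a.getD (i - 1) 0, (i : Int) - 1)
      else (a.getD i 0, (i : Int))
    else matchLoopA x a (i + 1)
  else (0, 0)
termination_by a.length - i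

def match_value (x : Int) (interval : List Int) : Int × Int :=
  match PySem.List.pyGet? interval 0, PySem.List.pyGet? interval (-1) with
  | some first, some last_ =>
      if x ≤ first then (first, 0)
      else if x ≥ last_ then (last_, -1)
      else matchLoopA x interval 1
  | _, _ => (0, 0)   -- IndexError on the empty list; excluded by Pre_

-- ===== PORT B =====
-- 'while lo < hi: mid = (lo+hi)//2; ...' hand-written bisect_left
def bisectLeftGo (a : List Int) (x : Int) (lo hi : Nat) : Nat :=
  if lo < hi then
    let mid := (lo + hi) / 2
    if a.getD mid 0 < x then bisectLeftGo a x (mid + 1) hi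
    else bisectLeftGo a x lo mid
  else lo
termination_by hi - lo
decreasing_by all_goals omega

def match_value_alt (x : Int) (interval : List Int) : Int × Int :=
  match PySem.List.pyGet? interval 0 with
  | none => (0, 0)   -- IndexError on the empty list; excluded by Pre_
  | some first =>
    match PySem.List.pyGet? interval (-1) with
    | none => (0, 0)
    | some last_ =>
      if x ≤ first then (first, 0)
      else if x ≥ last_ then (last_, -1)
      else
        let i := bisectLeftGo interval x 0 interval.length
        let prev := interval.getD (i - 1) 0
        if x - prev ≤ interval.getD i 0 - x then (prev, (i : Int) - 1)
        else (interval.getD i 0, (i : Int))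

-- ===== PRECONDITION & SPEC =====
-- Pre_ excludes the empty list (A raises IndexError) and, when x lies strictly between the
-- two ends (the only case that reaches the scan), lists not in ascending order, which are
-- outside the documented domain ("interval: ascending ordered set"); on such malformed
-- input A's first-match linear scan returns an accidental value.
def Pre_match_value (x : Int) (interval : List Int) : Prop :=
  interval ≠ [] ∧ (x ≤ interval.getD 0 0 ∨ interval.getD (interval.length - 1) 0 ≤ x ∨
    List.Pairwise (· ≤ ·) interval)
instance (x : Int) (interval : List Int) : Decidable (Pre_match_value x interval) := by
  unfold Pre_match_value; infer_instance
def pvWitness_match_value : Int × List Int := (4, [0, 3, 7, 9])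
def Spec_match_value (x : Int) (interval : List Int) (out : Int × Int) : Prop := out = match_value_alt x interval
instance (x : Int) (interval : List Int) (out : Int × Int) : Decidable (Spec_match_value x interval out) := by unfold Spec_match_value; infer_instance

-- ===== CLAIM (what is proved, stated in full; the proofs are below) =====
def Claim_equal_match_value : Prop := ∀ (x : Int) (interval : List Int), Dom_match_value x interval → Pre_match_value x interval → Spec_match_value x interval (match_value x interval)

-- ===== LEMMAS AND PROOFS =====

-- an ascending list is monotone under getD on in-range indices
lemma sorted_getD_mono {a : List Int} (hs : List.Pairwise (· ≤ ·) a)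
    {i j : Nat} (hij : i ≤ j) (hj : j < a.length) :
    a.getD i 0 ≤ a.getD j 0 := by
  rcases Nat.eq_or_lt_of_le hij with rfl | hlt
  · exact le_refl _
  · have hi : i < a.length := by omega
    have h := (List.pairwise_iff_getElem.mp hs) i j hi hj hlt
    have e1 : a.getD i 0 = a[i] := by
      rw [List.getD_eq_getElem?_getD, List.getElem?_eq_getElem hi]; rfl
    have e2 : a.getD j 0 = a[j] := by
      rw [List.getD_eq_getElem?_getD, List.getElem?_eq_getElem hj]; rfl
    rw [e1, e2]; exact h

-- binary-search invariant: bisectLeftGo returns the boundary of the predicate x ≤ a[·]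
lemma bl_spec (a : List Int) (x : Int) (hs : List.Pairwise (· ≤ ·) a) :
    ∀ n lo hi, hi - lo ≤ n → lo ≤ hi → hi ≤ a.length →
    (∀ j, j < lo → a.getD j 0 < x) →
    (∀ j, hi ≤ j → j < a.length → x ≤ a.getD j 0) →
    lo ≤ bisectLeftGo a x lo hi ∧ bisectLeftGo a x lo hi ≤ hi ∧
    (∀ j, j < bisectLeftGo a x lo hi → a.getD j 0 < x) ∧
    (∀ j, bisectLeftGo a x lo hi ≤ j → j < a.length → x ≤ a.getD j 0) := by
  intro n
  induction n with
  | zero =>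
    intro lo hi hfuel hle hhi hlow hhigh
    have hloeq : lo = hi := by omega
    subst hloeq
    rw [bisectLeftGo, if_neg (by omega : ¬ lo < lo)]
    exact ⟨le_refl _, le_refl _, hlow, hhigh⟩
  | succ n ih =>
    intro lo hi hfuel hle hhi hlow hhigh
    rw [bisectLeftGo]
    by_cases h : lo < hi
    · rw [if_pos h]
      simp only
      by_cases hc : a.getD ((lo + hi) / 2) 0 < x
      · rw [if_pos hc]
        refine (ih ((lo + hi) / 2 + 1) hi (by omega) (by omega) hhi ?_ hhigh).imp
          (by omega) id
        intro j hj
        calc a.getD j 0 ≤ a.getD ((lo + hi) / 2) 0 :=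
              sorted_getD_mono hs (by omega) (by omega)
          _ < x := hc
      · rw [if_neg hc]
        refine (ih lo ((lo + hi) / 2) (by omega) (by omega) (by omega) hlow ?_).imp id
          (fun h2 => ⟨by omega, h2.2⟩)
        intro j hj hjl
        calc x ≤ a.getD ((lo + hi) / 2) 0 := not_lt.mp hc
          _ ≤ a.getD j 0 := sorted_getD_mono hs hj hjl
    · rw [if_neg h]
      have hloeq : lo = hi := by omega
      subst hloeq
      exact ⟨le_refl _, le_refl _, hlow, hhigh⟩

-- A's scan from i reaches exactly the first index r with x ≤ a[r]
lemma loopA_spec (x : Int) (a : List Int) (r : Nat) (hr : r < a.length)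
    (hxr : x ≤ a.getD r 0) :
    ∀ n i, r - i ≤ n → i ≤ r → (∀ j, i ≤ j → j < r → a.getD j 0 < x) →
    matchLoopA x a i =
      (if x - a.getD (r - 1) 0 ≤ a.getD r 0 - x then (a.getD (r - 1) 0, (r : Int) - 1)
       else (a.getD r 0, (r : Int))) := by
  intro n
  induction n with
  | zero =>
    intro i hfuel hir hbelow
    have hieq : i = r := by omega
    subst hieq
    rw [matchLoopA, if_pos hr, if_pos hxr]
  | succ n ih =>
    intro i hfuel hir hbelow
    rcases Nat.eq_or_lt_of_le hir with hieq | hlt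
    · subst hieq
      rw [matchLoopA, if_pos hr, if_pos hxr]
    · have hi : i < a.length := by omega
      have hnot : ¬ x ≤ a.getD i 0 := not_le.mpr (hbelow i (le_refl _) hlt)
      rw [matchLoopA, if_pos hi, if_neg hnot]
      exact ih (i + 1) (by omega) (by omega) (fun j hj => hbelow j (by omega))

-- ===== VERDICT (by name: the statement is the Claim_ definition above) =====
theorem match_value_spec : Claim_equal_match_value := by
  intro x interval _hdom hpre
  obtain ⟨hne, hpre2⟩ := hpre
  unfold Spec_match_value match_value match_value_alt
  have hlen : 0 < interval.length := List.length_pos_iff.mpr hne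
  have h0 : PySem.List.pyGet? interval 0 = some (interval.getD 0 0) := by
    rw [show (0 : Int) = ((0 : Nat) : Int) from rfl, PySem.List.pyGet?_natCast,
      List.getD_eq_getElem?_getD, List.getElem?_eq_getElem hlen]
    rfl
  have hlast : PySem.List.pyGet? interval (-1) =
      some (interval.getD (interval.length - 1) 0) := by
    rw [PySem.List.pyGet?_neg_one, List.getLast?_eq_getElem?,
      List.getD_eq_getElem?_getD,
      List.getElem?_eq_getElem (show interval.length - 1 < interval.length by omega)]
    rfl
  rw [h0, hlast]
  simp only
  by_cases hb0 : x ≤ interval.getD 0 0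
  · simp only [if_pos hb0]
  · simp only [if_neg hb0]
    by_cases hb1 : x ≥ interval.getD (interval.length - 1) 0
    · simp only [if_pos hb1]
    · simp only [if_neg hb1]
      have hs : List.Pairwise (· ≤ ·) interval := by
        rcases hpre2 with h | h | h
        · exact absurd h hb0
        · exact absurd h hb1
        · exact h
      obtain ⟨-, hrhi, hbelow, habove⟩ :=
        bl_spec interval x hs interval.length 0 interval.length (by omega) (by omega)
          (le_refl _) (by omega) (by omega)
      set r := bisectLeftGo interval x 0 interval.length with hrdef
      have hrlt : r < interval.length := by
        by_contra hge
        have h1 := hbelow (interval.length - 1) (by omega)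
        have h2 : x < interval.getD (interval.length - 1) 0 := lt_of_not_ge hb1
        omega
      have hxr : x ≤ interval.getD r 0 := habove r (le_refl _) hrlt
      have hr1 : 1 ≤ r := by
        rcases Nat.eq_zero_or_pos r with hz | hp
        · exact absurd (hz ▸ hxr) hb0
        · exact hp
      rw [loopA_spec x interval r hrlt hxr (r - 1) 1 (by omega) hr1
        (fun j hj hjr => hbelow j hjr)]
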